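-- pv_equiv track=rewrite | github.com/zorell11/python-academy | 8.tring Formatting & Text Files/Exercises/list_divisors.py | count_divisable_numbers
-- ===== SOURCE A (Python) =====
-- def count_divisable_numbers(start, end, DIVISORS):
--     d = {}
--     for i in DIVISORS:
--         nums = []
--         for j in range(start, end +2):
--             if j % i ==0:
--                 nums.append(str(j))
--         d[i] = ', '.join(nums)
--     return d
-- ===== SOURCE B (Python) =====
-- def count_divisable_numbers(start, end, DIVISORS):
--     # Iterate only the multiples of each divisor instead of scanning the whole range.
--     d = {}
--     for i in DIVISORS:
--         m = abs(i)
--         first = start + (-start) % m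
--         d[i] = ', '.join(str(j) for j in range(first, end + 2, m))
--     return d
-- ===== Notes on version B (the rewrite author's own statement) =====
-- stated objective: faster
-- what changed: Instead of scanning every number in the range and testing j % i == 0 for each divisor, B steps directly through the multiples of |i| (first multiple >= start, step |i|), so only the matching numbers are ever visited.
-- outside the precondition, e.g. on count_divisable_numbers(155, 3, [6, 0]): A returns {6: '', 0: ''}, B raises ZeroDivisionError
import Mathlib
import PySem

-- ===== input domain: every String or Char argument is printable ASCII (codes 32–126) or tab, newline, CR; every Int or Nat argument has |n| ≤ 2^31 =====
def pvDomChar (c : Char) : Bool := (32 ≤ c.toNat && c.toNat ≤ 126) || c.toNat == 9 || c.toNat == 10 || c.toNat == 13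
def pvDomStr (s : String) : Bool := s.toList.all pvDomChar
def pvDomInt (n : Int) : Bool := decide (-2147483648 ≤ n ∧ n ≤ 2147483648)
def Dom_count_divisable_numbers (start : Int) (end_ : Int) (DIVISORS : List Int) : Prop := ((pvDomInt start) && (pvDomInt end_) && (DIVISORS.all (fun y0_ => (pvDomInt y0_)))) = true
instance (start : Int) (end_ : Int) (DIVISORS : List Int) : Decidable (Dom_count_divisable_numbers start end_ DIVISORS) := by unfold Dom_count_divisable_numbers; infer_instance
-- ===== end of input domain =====

-- B iterates only the multiples of each divisor (first multiple ≥ start, step |i|) instead of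
-- testing every number of the range for each divisor, so it visits asymptotically fewer numbers.

-- ===== PORT A =====
def count_divisable_numbers (start : Int) (end_ : Int) (DIVISORS : List Int) : List (Int × String) :=
  (DIVISORS.foldl (fun d i =>
      let nums := (PySem.List.pyRange start (end_ + 2) 1).foldl
        (fun nums j => if PySem.Int.mod j i == 0 then nums ++ [PySem.Int.toStr j] else nums) []
      d.insert i (PySem.Str.join ", " nums))
    (PySem.Dict.empty : PySem.Dict Int String)).items

-- ===== PORT B =====
def count_divisable_numbers_alt (start : Int) (end_ : Int) (DIVISORS : List Int) : List (Int × String) :=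
  (DIVISORS.foldl (fun d i =>
      let m : Int := (i.natAbs : Int)
      let first := start + PySem.Int.mod (-start) m
      d.insert i (PySem.Str.join ", " ((PySem.List.pyRange first (end_ + 2) m).map PySem.Int.toStr)))
    (PySem.Dict.empty : PySem.Dict Int String)).items

-- ===== PRECONDITION & SPEC =====
-- Pre_ excludes inputs with a divisor 0: there A raises ZeroDivisionError whenever the scanned
-- range is non-empty, and on an empty range A happens to return '' for every divisor without ever
-- dividing, while B always raises ZeroDivisionError on a divisor 0.
def Pre_count_divisable_numbers (start : Int) (end_ : Int) (DIVISORS : List Int) : Prop :=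
  (0 : Int) ∉ DIVISORS
instance (start : Int) (end_ : Int) (DIVISORS : List Int) : Decidable (Pre_count_divisable_numbers start end_ DIVISORS) := by unfold Pre_count_divisable_numbers; infer_instance
def pvWitness_count_divisable_numbers : Int × Int × List Int := (1, 10, [2, -3, 7])

def Spec_count_divisable_numbers (start : Int) (end_ : Int) (DIVISORS : List Int) (out : List (Int × String)) : Prop := out = count_divisable_numbers_alt start end_ DIVISORS
instance (start : Int) (end_ : Int) (DIVISORS : List Int) (out : List (Int × String)) : Decidable (Spec_count_divisable_numbers start end_ DIVISORS out) := by unfold Spec_count_divisable_numbers; infer_instance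

-- ===== CLAIM (what is proved, stated in full; the proofs are below) =====
def Claim_equal_count_divisable_numbers : Prop := ∀ (start : Int) (end_ : Int) (DIVISORS : List Int), Dom_count_divisable_numbers start end_ DIVISORS → Pre_count_divisable_numbers start end_ DIVISORS → Spec_count_divisable_numbers start end_ DIVISORS (count_divisable_numbers start end_ DIVISORS)

-- ===== LEMMAS AND PROOFS =====

-- Two strictly increasing integer lists with the same members are equal.
lemma eq_of_pairwise_lt_of_mem_iff (l₁ l₂ : List Int)
    (h₁ : l₁.Pairwise (· < ·)) (h₂ : l₂.Pairwise (· < ·))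
    (hm : ∀ x, x ∈ l₁ ↔ x ∈ l₂) : l₁ = l₂ :=
  List.eq_of_perm_of_sorted
    (fun _ _ _ _ hab hba => absurd hba (not_lt.mpr hab.le)) h₁ h₂
    ((List.perm_ext_iff_of_nodup h₁.nodup h₂.nodup).mpr hm)

-- A positive-step pyRange is strictly increasing.
lemma pairwise_lt_pyRange_pos (a b m : Int) (hm : 0 < m) :
    (PySem.List.pyRange a b m).Pairwise (· < ·) := by
  rw [PySem.List.pyRange_of_pos a b hm]
  refine List.Pairwise.map _ ?_ List.pairwise_lt_range
  intro k l hkl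
  have hk : (k : Int) < (l : Int) := by exact_mod_cast hkl
  nlinarith

-- The multiples of m in [a, b) are exactly the range from the first multiple ≥ a, step m.
lemma filter_dvd_pyRange (a b m : Int) (hm : 0 < m) :
    (PySem.List.pyRange a b 1).filter (fun j => decide (m ∣ j))
      = PySem.List.pyRange (a + PySem.Int.mod (-a) m) b m := by
  have hr0 : 0 ≤ PySem.Int.mod (-a) m := PySem.Int.mod_nonneg _ hm
  have hrm : PySem.Int.mod (-a) m < m := PySem.Int.mod_lt _ hm
  have hfd : PySem.Int.floordiv (-a) m * m + PySem.Int.mod (-a) m = -a :=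
    PySem.Int.floordiv_mul_add_mod _ _
  have hdvd : m ∣ a + PySem.Int.mod (-a) m := ⟨-(PySem.Int.floordiv (-a) m), by linarith⟩
  refine eq_of_pairwise_lt_of_mem_iff _ _ ?_ (pairwise_lt_pyRange_pos _ _ _ hm) ?_
  · exact List.Pairwise.sublist List.filter_sublist (PySem.List.pairwise_lt_pyRange_one a b)
  · intro x
    rw [List.mem_filter, PySem.List.mem_pyRange_one,
        PySem.List.mem_pyRange_iff_of_pos hm, decide_eq_true_eq]
    set r := PySem.Int.mod (-a) m with hr
    constructor
    · rintro ⟨⟨hax, hxb⟩, hdx⟩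
      refine ⟨?_, hxb, (dvd_sub_right hdx).mpr hdvd⟩
      by_contra hlt
      have hlt' : x < a + r := not_le.mp hlt
      have h1 : m ∣ a + r - x := (dvd_sub_right hdvd).mpr hdx
      have h2 := Int.le_of_dvd (by linarith [hlt']) h1
      linarith
    · rintro ⟨hfx, hxb, hdx⟩
      have : m ∣ (x - (a + r)) + (a + r) := dvd_add hdx hdvd
      exact ⟨⟨by linarith, hxb⟩, by simpa using this⟩

-- A's inner loop for divisor i ≠ 0 builds exactly B's list of strings.
lemma inner_loop_eq (start end_ i : Int) (hi : i ≠ 0) :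
    (PySem.List.pyRange start (end_ + 2) 1).foldl
        (fun nums j => if PySem.Int.mod j i == 0 then nums ++ [PySem.Int.toStr j] else nums) []
      = (PySem.List.pyRange (start + PySem.Int.mod (-start) ((i.natAbs : Int)))
          (end_ + 2) ((i.natAbs : Int))).map PySem.Int.toStr := by
  have hm : (0 : Int) < (i.natAbs : Int) := by exact_mod_cast Int.natAbs_pos.mpr hi
  rw [PySem.List.foldl_append_if (fun j => PySem.Int.mod j i == 0) PySem.Int.toStr, List.nil_append,
      ← filter_dvd_pyRange start (end_ + 2) _ hm]
  congr 1
  apply List.filter_congr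
  intro x _
  rw [Bool.eq_iff_iff]
  simp [PySem.Int.mod_eq_zero_iff_dvd]

-- ===== VERDICT (by name: the statement is the Claim_ definition above) =====
theorem count_divisable_numbers_spec : Claim_equal_count_divisable_numbers := by
  intro start end_ DIVISORS _ hpre
  unfold Spec_count_divisable_numbers count_divisable_numbers count_divisable_numbers_alt
  congr 1
  apply PySem.List.foldl_congr_mem
  intro d i hi
  have hne : i ≠ 0 := fun h => hpre (h ▸ hi)
  dsimp only
  rw [inner_loop_eq start end_ i hne]
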